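-- pv_equiv track=rewrite | github.com/seths-typos/conway | lc_json.py | process
-- ===== SOURCE A (Python) =====
-- def process(code):
-- 	arr = []
-- 	i = 0
-- 	j = 0
-- 	while i < len(code):
-- 		cur = code[i]
--
-- 		if (cur.isdigit()):
-- 			amt = int(cur)
-- 			if i + 1 < len(code):
-- 				aft = code[i+1]
-- 				tester = aft
--
-- 				if aft.isdigit():
-- 					amt = int(cur+aft)
-- 					tester = code[i+2]
-- 					i+=1
--
-- 				for _ in range(amt):
-- 					if (tester == "o"):
-- 						arr.append(j)
--
-- 					j += 1
--
-- 			i += 1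
-- 		else:
-- 			if (code[i] == "o"):
-- 				arr.append(j)
-- 			j += 1
--
-- 		i+=1
--
-- 	return (arr)
-- ===== SOURCE B (Python) =====
-- def process(code):
--     # Pass 1: decode the run-length string into a flat list of cells.
--     decoded = []
--     i = 0
--     while i < len(code):
--         ch = code[i]
--         if ch.isdigit():
--             if i + 1 >= len(code):
--                 break  # lone trailing digit: decodes to nothing
--             nxt = code[i + 1]
--             if nxt.isdigit():
--                 count = int(ch + nxt)
--                 tester = code[i + 2]
--                 i += 3
--             else:
--                 count = int(ch)
--                 tester = nxt
--                 i += 2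
--             decoded.extend([tester] * count)
--         else:
--             decoded.append(ch)
--             i += 1
--     # Pass 2: collect the indices of the live cells.
--     return [idx for idx, c in enumerate(decoded) if c == "o"]
-- ===== Notes on version B (the rewrite author's own statement) =====
-- stated objective: simpler
-- what changed: B separates decoding from index collection: it first expands the run-length string into a flat list of cells, then returns the live-cell indices with a single enumerate-filter pass; A interleaves parsing, a running cell counter and conditional appends in one loop.
import Mathlib
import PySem

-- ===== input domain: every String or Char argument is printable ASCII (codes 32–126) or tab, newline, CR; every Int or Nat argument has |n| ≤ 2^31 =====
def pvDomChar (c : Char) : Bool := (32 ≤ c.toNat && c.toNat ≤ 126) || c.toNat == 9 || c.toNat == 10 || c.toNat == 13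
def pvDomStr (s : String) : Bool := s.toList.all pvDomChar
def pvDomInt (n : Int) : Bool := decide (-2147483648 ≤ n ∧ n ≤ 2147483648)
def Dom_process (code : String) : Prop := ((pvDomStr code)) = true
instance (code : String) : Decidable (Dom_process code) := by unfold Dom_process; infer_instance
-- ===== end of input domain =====

-- B decodes the run-length string into a flat cell list first, then collects the live-cell
-- indices in a separate enumerate/filter pass (no interleaved counter); equivalence proved on
-- inputs where A does not raise IndexError.


-- ===== PORT A =====
-- While loop over the string with index i, cell counter j and accumulator arr; the inner
-- `for _ in range(amt)` is the foldl over List.range amt with state (arr, j).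
def processGo : List Char → Int → List Int → List Int
  | [], _, arr => arr
  | c :: rest, j, arr =>
    if PySem.Chars.isdigit c then
      match rest with
      | [] => arr        -- lone trailing digit: i+1 < len fails, loop ends
      | aft :: rest2 =>
        if PySem.Chars.isdigit aft then
          match rest2 with
          | [] => arr    -- Python: code[i+2] raises IndexError here (excluded by Pre_)
          | tester :: rest3 =>
            let amt : Nat := 10 * (c.toNat - 48) + (aft.toNat - 48)
            let p := (List.range amt).foldl
              (fun (p : List Int × Int) _ =>
                (if tester = 'o' then p.1 ++ [p.2] else p.1, p.2 + 1)) (arr, j)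
            processGo rest3 p.2 p.1
        else
          let amt : Nat := c.toNat - 48
          let p := (List.range amt).foldl
            (fun (p : List Int × Int) _ =>
              (if aft = 'o' then p.1 ++ [p.2] else p.1, p.2 + 1)) (arr, j)
          processGo rest2 p.2 p.1
    else
      processGo rest (j + 1) (if c = 'o' then arr ++ [j] else arr)

def process (code : String) : List Int := processGo code.toList 0 []

-- ===== PORT B =====
-- Pass 1 of Source B: decode the run-length string into the flat list of cells.
def decodeGo : List Char → List Char
  | [] => []
  | c :: rest =>
    if PySem.Chars.isdigit c then
      match rest with
      | [] => []         -- lone trailing digit decodes to nothing (Source B: break)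
      | aft :: rest2 =>
        if PySem.Chars.isdigit aft then
          match rest2 with
          | [] => []     -- Python: code[i+2] raises IndexError here (excluded by Pre_)
          | tester :: rest3 =>
            List.replicate (10 * (c.toNat - 48) + (aft.toNat - 48)) tester ++ decodeGo rest3
        else
          List.replicate (c.toNat - 48) aft ++ decodeGo rest2
    else c :: decodeGo rest

-- Pass 2 of Source B: [idx for idx, c in enumerate(decoded) if c == "o"]
def process_alt (code : String) : List Int :=
  ((PySem.List.enumerate (decodeGo code.toList) 0).filter (fun p => p.2 == 'o')).map (·.1)

-- ===== PRECONDITION & SPEC =====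
-- Pre_ excludes exactly the strings on which A raises IndexError: a two-digit count token
-- (digit, digit) whose tester character is past the end of the string; both Pythons raise there.
-- 3-state scanner over the string: state 0 = at a token start, 1 = one count digit seen,
-- 2 = two count digits seen (next char is the tester).  A raises iff the scan ends in state 2.
def rleStep (s : Nat) (c : Char) : Nat :=
  if s = 2 then 0 else if PySem.Chars.isdigit c then s + 1 else 0

def rleOk (cs : List Char) : Bool := cs.foldl rleStep 0 != 2

def Pre_process (code : String) : Prop := rleOk code.toList = true
instance (code : String) : Decidable (Pre_process code) := by unfold Pre_process; infer_instance

def pvWitness_process : String := "3o2b o12o"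

def Spec_process (code : String) (out : List Int) : Prop := out = process_alt code
instance (code : String) (out : List Int) : Decidable (Spec_process code out) := by unfold Spec_process; infer_instance

-- ===== CLAIM (what is proved, stated in full; the proofs are below) =====
def Claim_equal_process : Prop := ∀ (code : String), Dom_process code → Pre_process code → Spec_process code (process code)

-- ===== LEMMAS AND PROOFS =====

-- indices ≥ j of the 'o' cells of a decoded list
def oIdx : List Char → Int → List Int
  | [], _ => []
  | c :: cs, j => (if c = 'o' then [j] else []) ++ oIdx cs (j + 1)

theorem enum_filter_eq_oIdx (ds : List Char) (s : Int) :
    ((PySem.List.enumerate ds s).filter (fun p => p.2 == 'o')).map (·.1) = oIdx ds s := by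
  induction ds generalizing s with
  | nil => simp [PySem.List.enumerate_nil, oIdx]
  | cons c cs ih =>
    by_cases h : c = 'o' <;>
      simp [PySem.List.enumerate_cons, oIdx, h, List.filter_cons, ih]

theorem oIdx_append (xs ys : List Char) (j : Int) :
    oIdx (xs ++ ys) j = oIdx xs j ++ oIdx ys (j + (xs.length : Int)) := by
  induction xs generalizing j with
  | nil => simp [oIdx]
  | cons c cs ih =>
    simp only [List.cons_append, oIdx, ih, List.length_cons, List.append_assoc]
    congr 2
    push_cast
    ring_nf

theorem foldl_range_eq_oIdx (n : Nat) (t : Char) (arr : List Int) (j : Int) :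
    (List.range n).foldl
      (fun (p : List Int × Int) _ => (if t = 'o' then p.1 ++ [p.2] else p.1, p.2 + 1)) (arr, j)
      = (arr ++ oIdx (List.replicate n t) j, j + n) := by
  induction n generalizing arr j with
  | zero => simp [oIdx]
  | succ n ih =>
    rw [List.range_succ, List.foldl_append, ih]
    simp only [List.foldl_cons, List.foldl_nil]
    rw [List.replicate_succ', oIdx_append, List.length_replicate]
    by_cases h : t = 'o'
    · simp only [h, if_true, oIdx, Prod.mk.injEq, List.append_assoc, List.append_nil]
      constructor
      · trivial
      · push_cast; ring
    · simp only [h, if_false, oIdx, Prod.mk.injEq, List.append_assoc, List.append_nil]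
      constructor
      · simp
      · push_cast; ring

theorem processGo_eq (cs : List Char) :
    rleOk cs = true → ∀ (j : Int) (arr : List Int),
      processGo cs j arr = arr ++ oIdx (decodeGo cs) j := by
  induction cs using decodeGo.induct with
  | case1 => intro _ j arr; simp [processGo, decodeGo, oIdx]
  | case2 c hc =>
    intro _ j arr
    simp [processGo, decodeGo, hc, oIdx]
  | case3 c hc d hd2 =>
    intro hok j arr
    simp [rleOk, List.foldl, rleStep, hc, hd2] at hok
  | case4 c hc d hd2 t rest3 ih =>
    intro hok j arr
    have hok' : rleOk rest3 = true := by
      simpa [rleOk, List.foldl, rleStep, hc, hd2] using hok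
    simp only [processGo, decodeGo, hc, hd2, if_true, foldl_range_eq_oIdx,
      ih hok', oIdx_append, List.length_replicate, List.append_assoc]
  | case5 c hc aft rest2 hna ih =>
    intro hok j arr
    cases rest2 with
    | nil =>
      simp [processGo, decodeGo, hc, hna, foldl_range_eq_oIdx]
    | cons x xs =>
      have hok' : rleOk (x :: xs) = true := by
        simpa [rleOk, List.foldl, rleStep, hc, hna] using hok
      simp [processGo, decodeGo, hc, hna, foldl_range_eq_oIdx, ih hok',
        oIdx_append, List.append_assoc]
  | case6 c rest hnd ih =>
    intro hok j arr
    cases rest with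
    | nil =>
      by_cases h : c = 'o'
      · subst h; simp [processGo, decodeGo, hnd, oIdx]
      · simp [processGo, decodeGo, hnd, h, oIdx]
    | cons x xs =>
      cases xs with
      | nil =>
        have hok' : rleOk [x] = true := by
          simp [rleOk, List.foldl, rleStep]
          split_ifs <;> simp
        by_cases h : c = 'o'
        · subst h
          simp [processGo, decodeGo, hnd, List.append_assoc]
          split_ifs <;> simp_all [oIdx]
        · simp [processGo, decodeGo, hnd, h, List.append_assoc]
          split_ifs <;> simp_all [oIdx]
      | cons y ys =>
        have hok' : rleOk (x :: y :: ys) = true := by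
          simpa [rleOk, List.foldl, rleStep, hnd] using hok
        by_cases h : c = 'o'
        · subst h; simp [processGo, decodeGo, hnd, oIdx, ih hok', List.append_assoc]
        · simp [processGo, decodeGo, hnd, h, oIdx, ih hok', List.append_assoc]

-- ===== VERDICT (by name: the statement is the Claim_ definition above) =====
theorem process_spec : Claim_equal_process := by
  intro code _ hpre
  unfold Spec_process process process_alt
  rw [enum_filter_eq_oIdx, processGo_eq code.toList hpre 0 []]
  simp
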